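-- pv_equiv track=rewrite | github.com/Dashuto22/DSA | Arrays_and_Hashing/unique_length_3_palindromic_subeq.py | unique_length_three_palindromic_subseq
-- ===== SOURCE A (Python) =====
-- def unique_length_three_palindromic_subseq(s):
--     res = set()
--     left = set()
--     right = {}
--
--
--     for i in range(len(s)):
--         right[s[i]] = 1 + right.get(s[i], 0)
--
--     for i in range(len(s)):
--         right[s[i]] -= 1
--         if right[s[i]] == 0:
--             right.pop(s[i])
--
--         for j in range(26):
--             c = chr(ord('a') + j)
--             if c in left and c in right:
--                 res.add((s[i],c))
--
--         left.add(s[i])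
--
--     return len(res)
-- ===== SOURCE B (Python) =====
-- def unique_length_three_palindromic_subseq(s):
--     total = 0
--     for j in range(26):
--         c = chr(ord('a') + j)
--         lo = s.find(c)
--         hi = s.rfind(c)
--         if lo != -1 and hi > lo:
--             total += len(set(s[lo + 1:hi]))
--     return total
-- ===== Notes on version B (the rewrite author's own statement) =====
-- stated objective: simpler
-- what changed: A scans positions once maintaining a left-seen set, a right count dict and a 26-letter membership check at every index; B instead loops over the 26 letters, takes each letter's first (find) and last (rfind) occurrence and adds the number of distinct characters in the slice strictly between them.
import Mathlib
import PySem

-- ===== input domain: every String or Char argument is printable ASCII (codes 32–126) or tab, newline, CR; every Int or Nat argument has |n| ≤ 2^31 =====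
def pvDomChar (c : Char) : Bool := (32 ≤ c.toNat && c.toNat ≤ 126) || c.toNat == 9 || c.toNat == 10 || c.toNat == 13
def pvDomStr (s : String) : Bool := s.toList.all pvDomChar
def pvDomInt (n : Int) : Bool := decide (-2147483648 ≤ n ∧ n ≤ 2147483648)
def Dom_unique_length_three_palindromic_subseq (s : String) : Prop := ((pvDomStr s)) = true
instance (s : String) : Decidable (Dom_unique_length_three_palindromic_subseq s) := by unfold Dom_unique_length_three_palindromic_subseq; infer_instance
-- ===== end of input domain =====

-- B replaces A's position scan (left set / right counter / 26-letter check at every index)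
-- by a per-letter pass: first and last occurrence of each letter, then the distinct characters
-- strictly between them; simpler, and measured faster in a timing run (constant-factor).

-- ===== PORT A =====
-- one iteration of A's main loop; state = (res, left, right)
def pvA_step (st : PySem.Set (Char × Char) × PySem.Set Char × PySem.Dict Char Int) (ch : Char) :
    PySem.Set (Char × Char) × PySem.Set Char × PySem.Dict Char Int :=
  -- right[s[i]] -= 1  (the key is always present at this point, so insert = the Python update)
  let right1 := st.2.2.insert ch (st.2.2.getD ch 0 - 1)
  -- if right[s[i]] == 0: right.pop(s[i])
  let right2 := if right1.getD ch 0 = 0 then right1.erase ch else right1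
  -- for j in range(26): c = chr(ord('a')+j); if c in left and c in right: res.add((s[i], c))
  let res' := (PySem.List.pyRange 0 26).foldl (fun r j =>
      let c := Char.ofNat (97 + j).toNat
      if PySem.Set.contains st.2.1 c && right2.contains c then PySem.Set.add r (ch, c) else r)
    st.1
  (res', PySem.Set.add st.2.1 ch, right2)

def unique_length_three_palindromic_subseq (s : String) : Int :=
  let cs := s.toList
  let right0 : PySem.Dict Char Int :=
    cs.foldl (fun d ch => d.insert ch (1 + d.getD ch 0)) PySem.Dict.empty
  PySem.Set.len (cs.foldl pvA_step (PySem.Set.empty, PySem.Set.empty, right0)).1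

-- ===== PORT B =====
def unique_length_three_palindromic_subseq_alt (s : String) : Int :=
  let cs := s.toList
  (PySem.List.pyRange 0 26).foldl (fun total j =>
    let c := Char.ofNat (97 + j).toNat
    let lo := PySem.Chars.find cs [c]
    let hi := PySem.Chars.rfind cs [c]
    if lo ≠ -1 ∧ hi > lo then
      total + PySem.Set.len (PySem.Set.ofList (PySem.List.slice cs (some (lo + 1)) (some hi)))
    else total) 0

-- ===== PRECONDITION & SPEC =====
def Spec_unique_length_three_palindromic_subseq (s : String) (out : Int) : Prop := out = unique_length_three_palindromic_subseq_alt s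
instance (s : String) (out : Int) : Decidable (Spec_unique_length_three_palindromic_subseq s out) := by unfold Spec_unique_length_three_palindromic_subseq; infer_instance

-- ===== CLAIM (what is proved, stated in full; the proofs are below) =====
def Claim_equal_unique_length_three_palindromic_subseq : Prop := ∀ (s : String), Dom_unique_length_three_palindromic_subseq s → Spec_unique_length_three_palindromic_subseq s (unique_length_three_palindromic_subseq s)

-- ===== LEMMAS AND PROOFS =====

-- the 26 lowercase letters, in order
def pvAz : List Char := (List.range 26).map (fun k => Char.ofNat (97 + k))

-- "m sits strictly between an occurrence of c on its left and one on its right"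
def pvQ (cs : List Char) (c m : Char) : Prop :=
  ∃ p1 p2, cs = p1 ++ m :: p2 ∧ c ∈ p1 ∧ c ∈ p2

-- boolean index form of pvQ
def pvQb (cs : List Char) (c m : Char) : Bool :=
  (List.range cs.length).any (fun k => cs[k]? == some c &&
    (List.range k).any (fun j => cs[j]? == some m &&
      (List.range j).any (fun i => cs[i]? == some c)))

lemma pv_getElem?_lt {cs : List Char} {k : Nat} {c : Char} (h : cs[k]? = some c) :
    k < cs.length := by
  by_contra hge
  rw [List.getElem?_eq_none (by omega)] at h
  cases h

lemma pvQb_eq_true_iff (cs : List Char) (c m : Char) :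
    pvQb cs c m = true ↔
      ∃ i j k : Nat, i < j ∧ j < k ∧ cs[i]? = some c ∧ cs[j]? = some m ∧ cs[k]? = some c := by
  constructor
  · intro h
    simp only [pvQb, List.any_eq_true, List.mem_range, Bool.and_eq_true, beq_iff_eq] at h
    obtain ⟨k, _, hk, j, hjk, hj, i, hij, hi⟩ := h
    exact ⟨i, j, k, hij, hjk, hi, hj, hk⟩
  · rintro ⟨i, j, k, hij, hjk, hi, hj, hk⟩
    have hklen : k < cs.length := pv_getElem?_lt hk
    simp only [pvQb, List.any_eq_true, List.mem_range, Bool.and_eq_true, beq_iff_eq]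
    exact ⟨k, hklen, hk, j, hjk, hj, i, hij, hi⟩

lemma pv_mem_take_drop_iff (cs : List Char) (a b : Nat) (m : Char) :
    m ∈ List.take (b - (a + 1)) (List.drop (a + 1) cs) ↔
      ∃ j, a < j ∧ j < b ∧ cs[j]? = some m := by
  rw [List.mem_iff_getElem?]
  constructor
  · rintro ⟨i, hi⟩
    rw [List.getElem?_take] at hi
    split at hi
    · rw [List.getElem?_drop] at hi
      exact ⟨a + 1 + i, by omega, by omega, hi⟩
    · simp at hi
  · rintro ⟨j, h1, h2, hj⟩
    refine ⟨j - (a + 1), ?_⟩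
    rw [List.getElem?_take, if_pos (by omega), List.getElem?_drop,
      show a + 1 + (j - (a + 1)) = j by omega]
    exact hj

lemma pvQb_mem (cs : List Char) (c m : Char) (h : pvQb cs c m = true) : m ∈ cs := by
  rw [pvQb_eq_true_iff] at h
  obtain ⟨i, j, k, _, _, _, hj, _⟩ := h
  exact List.mem_iff_getElem?.mpr ⟨j, hj⟩

lemma pv_mem_take_iff (p1 : List Char) (rest : List Char) (c : Char) :
    c ∈ p1 ↔ ∃ i, i < p1.length ∧ (p1 ++ rest)[i]? = some c := by
  constructor
  · intro h
    obtain ⟨i, hi⟩ := List.mem_iff_getElem?.mp h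
    have hilen : i < p1.length := pv_getElem?_lt hi
    exact ⟨i, hilen, by rwa [List.getElem?_append_left hilen]⟩
  · rintro ⟨i, hlen, hi⟩
    rw [List.getElem?_append_left hlen] at hi
    exact List.mem_iff_getElem?.mpr ⟨i, hi⟩

lemma pvQ_iff_Qb (cs : List Char) (c m : Char) : pvQ cs c m ↔ pvQb cs c m = true := by
  rw [pvQb_eq_true_iff]
  constructor
  · rintro ⟨p1, p2, rfl, hc1, hc2⟩
    obtain ⟨i, hilen, hi⟩ := (pv_mem_take_iff p1 (m :: p2) c).mp hc1
    obtain ⟨i2, hi2⟩ := List.mem_iff_getElem?.mp hc2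
    refine ⟨i, p1.length, p1.length + 1 + i2, hilen, by omega, hi, ?_, ?_⟩
    · rw [List.getElem?_append_right (le_refl _)]
      simp
    · rw [List.getElem?_append_right (by omega : p1.length ≤ p1.length + 1 + i2),
        show p1.length + 1 + i2 - p1.length = i2 + 1 by omega]
      simpa using hi2
  · rintro ⟨i, j, k, hij, hjk, hi, hj, hk⟩
    have hjlen : j < cs.length := pv_getElem?_lt hj
    refine ⟨cs.take j, cs.drop (j + 1), ?_, ?_, ?_⟩
    · have hm : some cs[j] = some m := (List.getElem?_eq_getElem hjlen).symm.trans hj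
      rw [← Option.some.inj hm, List.getElem_cons_drop, List.take_append_drop]
    · apply (pv_mem_take_iff (cs.take j) (cs.drop j) c).mpr
      refine ⟨i, ?_, ?_⟩
      · rw [List.length_take]; omega
      · rwa [List.take_append_drop]
    · apply List.mem_iff_getElem?.mpr
      exact ⟨k - (j + 1), by
        rw [List.getElem?_drop, show j + 1 + (k - (j + 1)) = k by omega]; exact hk⟩

-- Dict.erase facts (no such lemmas in the prelude)
lemma pv_find?_filter_ne {ν : Type} (l : List (Char × ν)) (k k' : Char) (hne : k' ≠ k) :
    List.find? (fun p => p.1 == k') (l.filter (fun p => !(p.1 == k))) =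
      List.find? (fun p => p.1 == k') l := by
  induction l with
  | nil => rfl
  | cons p t ih =>
    by_cases hp : p.1 = k
    · have h1 : ¬ ((!(p.1 == k)) = true) := by simp [hp]
      have h2 : ¬ ((p.1 == k') = true) := by
        simp only [beq_iff_eq, hp]
        exact fun h => hne h.symm
      rw [List.filter_cons_of_neg (p := fun (q : Char × ν) => !(q.1 == k)) (by simpa using h1),
        List.find?_cons_of_neg (p := fun (q : Char × ν) => q.1 == k') h2, ih]
    · have h1 : (!(p.1 == k)) = true := by simp [hp]
      rw [List.filter_cons_of_pos (p := fun (q : Char × ν) => !(q.1 == k)) h1]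
      by_cases h2 : (p.1 == k') = true
      · rw [List.find?_cons_of_pos (p := fun (q : Char × ν) => q.1 == k') h2,
          List.find?_cons_of_pos (p := fun (q : Char × ν) => q.1 == k') h2]
      · rw [List.find?_cons_of_neg (p := fun (q : Char × ν) => q.1 == k') h2,
          List.find?_cons_of_neg (p := fun (q : Char × ν) => q.1 == k') h2, ih]

lemma pv_get?_erase {ν : Type} (d : PySem.Dict Char ν) (k k' : Char) :
    (d.erase k).get? k' = if k' = k then none else d.get? k' := by
  obtain ⟨l⟩ := d
  simp only [PySem.Dict.erase, PySem.Dict.get?]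
  by_cases h2 : k' = k
  · rw [if_pos h2]
    subst h2
    rw [List.find?_eq_none.mpr]
    · rfl
    · intro p hp
      rw [List.mem_filter] at hp
      simpa using hp.2
  · rw [if_neg h2, pv_find?_filter_ne l k k' h2]

lemma pv_getD_erase (d : PySem.Dict Char Int) (k k' : Char) (v : Int) :
    (d.erase k).getD k' v = if k' = k then v else d.getD k' v := by
  simp only [PySem.Dict.getD, pv_get?_erase]
  split <;> rfl

lemma pv_contains_erase {ν : Type} (d : PySem.Dict Char ν) (k k' : Char) :
    ((d.erase k).contains k' = true) ↔ (k' ≠ k ∧ d.contains k' = true) := by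
  obtain ⟨l⟩ := d
  simp only [PySem.Dict.erase, PySem.Dict.contains, List.any_filter, List.any_eq_true,
    Bool.and_eq_true, Bool.not_eq_eq_eq_not, Bool.not_true, beq_eq_false_iff_ne, ne_eq,
    beq_iff_eq]
  constructor
  · rintro ⟨p, hp, hne, rfl⟩
    exact ⟨hne, p, hp, rfl⟩
  · rintro ⟨hne, p, hp, rfl⟩
    exact ⟨p, hp, hne, rfl⟩

-- invariant of A's `right` dict relative to the unprocessed suffix
def pvRinv (d : PySem.Dict Char Int) (suf : List Char) : Prop :=
  ∀ c, d.getD c 0 = (suf.count c : Int) ∧ (d.contains c = true ↔ c ∈ suf)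

lemma pvRinv_init (cs : List Char) :
    pvRinv (cs.foldl (fun d ch => d.insert ch (1 + d.getD ch 0)) PySem.Dict.empty) cs := by
  intro c
  have hfg : (fun (d : PySem.Dict Char Int) ch => d.insert ch (1 + d.getD ch 0)) =
      (fun (d : PySem.Dict Char Int) ch => d.insert ch (d.getD ch 0 + 1)) := by
    funext d ch
    rw [Int.add_comm]
  rw [hfg]
  constructor
  · rw [PySem.Dict.getD_foldl_insert_add_one, PySem.Dict.getD_empty]
    simp
  · rw [PySem.Dict.contains_iff_mem_keys, PySem.Dict.keys_foldl_insert]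
    simp [PySem.Dict.keys_empty, PySem.Set.mem_update]

lemma pvRinv_step (d : PySem.Dict Char Int) (ch : Char) (rest : List Char)
    (h : pvRinv d (ch :: rest)) :
    pvRinv (if (d.insert ch (d.getD ch 0 - 1)).getD ch 0 = 0
            then (d.insert ch (d.getD ch 0 - 1)).erase ch
            else d.insert ch (d.getD ch 0 - 1)) rest := by
  intro c
  have hch := h ch
  have hc := h c
  have hcnt : d.getD ch 0 - 1 = (rest.count ch : Int) := by
    rw [hch.1]
    simp
  have hgd : (d.insert ch (d.getD ch 0 - 1)).getD ch 0 = (rest.count ch : Int) := by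
    rw [PySem.Dict.getD_insert, if_pos rfl, hcnt]
  by_cases h0 : (d.insert ch (d.getD ch 0 - 1)).getD ch 0 = 0
  · rw [if_pos h0]
    have hzero : rest.count ch = 0 := by
      rw [hgd] at h0
      exact_mod_cast h0
    have hnotin : ch ∉ rest := List.count_eq_zero.mp hzero
    by_cases hcch : c = ch
    · subst hcch
      constructor
      · rw [pv_getD_erase, if_pos rfl, hzero]
        rfl
      · rw [pv_contains_erase]
        simp [hnotin]
    · constructor
      · rw [pv_getD_erase, if_neg hcch, PySem.Dict.getD_insert, if_neg hcch, hc.1]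
        simp [List.count_cons]
        exact fun hh => hcch hh.symm
      · rw [pv_contains_erase, PySem.Dict.contains_insert]
        constructor
        · rintro ⟨-, hor⟩
          rw [Bool.or_eq_true] at hor
          rcases hor with hl | hr
          · exact absurd (by simpa using hl) hcch
          · have := hc.2.mp hr
            simp only [List.mem_cons] at this
            tauto
        · intro hmem
          refine ⟨hcch, ?_⟩
          rw [Bool.or_eq_true]
          right
          exact hc.2.mpr (List.mem_cons_of_mem _ hmem)
  · rw [if_neg h0]
    have hpos : ch ∈ rest := by
      rw [hgd] at h0
      have hne : rest.count ch ≠ 0 := by exact_mod_cast h0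
      exact List.count_pos_iff.mp (Nat.pos_of_ne_zero hne)
    by_cases hcch : c = ch
    · subst hcch
      refine ⟨hgd, ?_⟩
      rw [PySem.Dict.contains_insert]
      simp [hpos]
    · constructor
      · rw [PySem.Dict.getD_insert, if_neg hcch, hc.1]
        simp [List.count_cons]
        exact fun hh => hcch hh.symm
      · rw [PySem.Dict.contains_insert, Bool.or_eq_true]
        constructor
        · rintro (hl | hr)
          · exact absurd (by simpa using hl) hcch
          · have := hc.2.mp hr
            simp only [List.mem_cons] at this
            tauto
        · intro hmem
          right
          exact hc.2.mpr (List.mem_cons_of_mem _ hmem)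

-- membership after A's inner 26-letter loop
lemma pvA_inner_mem (left : PySem.Set Char) (right2 : PySem.Dict Char Int)
    (res : PySem.Set (Char × Char)) (ch : Char) :
    ((PySem.List.pyRange 0 26).foldl (fun r j =>
        let c := Char.ofNat (97 + j).toNat
        if PySem.Set.contains left c && right2.contains c then PySem.Set.add r (ch, c) else r)
      res)
    = PySem.Set.update res
        ((pvAz.filter (fun c => PySem.Set.contains left c && right2.contains c)).map
          (fun c => (ch, c))) := by
  have h26 : (26 : Int) = ((26 : Nat) : Int) := by norm_num
  rw [h26, PySem.List.pyRange_zero_natCast, List.foldl_map]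
  have hc : ∀ (k : Nat), ((97 : Int) + (k : Int)).toNat = 97 + k := fun k => by omega
  simp only [hc]
  rw [PySem.Set.update_map_eq_foldl_add, ← PySem.List.foldl_if_eq_foldl_filter
    (p := fun c => PySem.Set.contains left c && right2.contains c)
    (f := fun r c => PySem.Set.add r (ch, c))]
  rw [show pvAz = (List.range 26).map (fun k => Char.ofNat (97 + k)) from rfl, List.foldl_map]

-- split decomposition used in the loop-invariant step
lemma pv_decomp (pre : List Char) (ch m c : Char) (rest : List Char) :
    (∃ p1 p2, pre ++ [ch] = p1 ++ m :: p2 ∧ c ∈ p1 ∧ c ∈ p2 ++ rest) ↔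
    ((∃ p1 p2, pre = p1 ++ m :: p2 ∧ c ∈ p1 ∧ c ∈ p2 ++ (ch :: rest)) ∨
      (m = ch ∧ c ∈ pre ∧ c ∈ rest)) := by
  constructor
  · rintro ⟨p1, p2, heq, hc1, hc2⟩
    rcases List.eq_nil_or_concat p2 with rfl | ⟨q, x, rfl⟩
    · have hlen : pre.length = p1.length := by
        have hl := congrArg List.length heq
        simp at hl
        omega
      have hpre : pre = p1 := List.append_inj_left heq (by simpa using hlen)
      have hm : ch = m := by
        have := List.append_inj_right heq (by simpa using hlen)
        simpa using this
      right
      exact ⟨hm.symm, hpre ▸ hc1, by simpa using hc2⟩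
    · have heq2 : pre ++ [ch] = (p1 ++ m :: q) ++ [x] := by
        rw [heq]
        simp [List.concat_eq_append]
      have hlen : pre.length = (p1 ++ m :: q).length := by
        have hl := congrArg List.length heq2
        simp at hl
        simp
        omega
      have hpre : pre = p1 ++ m :: q := List.append_inj_left heq2 hlen
      have hx : ch = x := by
        have := List.append_inj_right heq2 hlen
        simpa using this
      subst hx
      left
      refine ⟨p1, q, hpre, hc1, ?_⟩
      simp only [List.concat_eq_append, List.append_assoc, List.mem_append, List.mem_cons,
        List.not_mem_nil] at hc2 ⊢
      tauto
  · rintro (⟨p1, p2, rfl, hc1, hc2⟩ | ⟨rfl, hc1, hc2⟩)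
    · refine ⟨p1, p2 ++ [ch], by simp, hc1, ?_⟩
      simp only [List.append_assoc, List.mem_append, List.mem_cons,
        List.not_mem_nil] at hc2 ⊢
      tauto
    · exact ⟨pre, [], by simp, hc1, by simpa using hc2⟩

-- A's loop invariant, stated over the remaining suffix
lemma pvA_loop (suf : List Char) : ∀ (pre : List Char) (res : PySem.Set (Char × Char))
    (left : PySem.Set Char) (right : PySem.Dict Char Int),
    res.Nodup →
    (∀ c, c ∈ left ↔ c ∈ pre) →
    pvRinv right suf →
    (∀ m c, (m, c) ∈ res ↔ c ∈ pvAz ∧ ∃ p1 p2, pre = p1 ++ m :: p2 ∧ c ∈ p1 ∧ c ∈ p2 ++ suf) →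
    (suf.foldl pvA_step (res, left, right)).1.Nodup ∧
    (∀ m c, (m, c) ∈ (suf.foldl pvA_step (res, left, right)).1 ↔
        c ∈ pvAz ∧ pvQ (pre ++ suf) c m) := by
  induction suf with
  | nil =>
    intro pre res left right hnd hL hR hres
    simp only [List.foldl_nil]
    refine ⟨hnd, fun m c => ?_⟩
    rw [hres m c]
    simp [pvQ]
  | cons ch rest ih =>
    intro pre res left right hnd hL hR hres
    have hR2 := pvRinv_step right ch rest hR
    have hstep : pvA_step (res, left, right) ch =
        (PySem.Set.update res
          ((pvAz.filter (fun c => PySem.Set.contains left c &&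
            (if (right.insert ch (right.getD ch 0 - 1)).getD ch 0 = 0
             then (right.insert ch (right.getD ch 0 - 1)).erase ch
             else right.insert ch (right.getD ch 0 - 1)).contains c)).map (fun c => (ch, c))),
         PySem.Set.add left ch,
         (if (right.insert ch (right.getD ch 0 - 1)).getD ch 0 = 0
          then (right.insert ch (right.getD ch 0 - 1)).erase ch
          else right.insert ch (right.getD ch 0 - 1))) := by
      simp only [pvA_step]
      rw [pvA_inner_mem]
    have hL2 : ∀ c, c ∈ PySem.Set.add left ch ↔ c ∈ pre ++ [ch] := by
      intro c
      rw [PySem.Set.mem_add, List.mem_append, List.mem_singleton, hL c]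
    have hres2 : ∀ m c, (m, c) ∈ PySem.Set.update res
          ((pvAz.filter (fun c => PySem.Set.contains left c &&
            (if (right.insert ch (right.getD ch 0 - 1)).getD ch 0 = 0
             then (right.insert ch (right.getD ch 0 - 1)).erase ch
             else right.insert ch (right.getD ch 0 - 1)).contains c)).map (fun c => (ch, c))) ↔
        c ∈ pvAz ∧ ∃ p1 p2, pre ++ [ch] = p1 ++ m :: p2 ∧ c ∈ p1 ∧ c ∈ p2 ++ rest := by
      intro m c
      rw [PySem.Set.mem_update, hres m c, pv_decomp pre ch m c rest]
      constructor
      · rintro (⟨haz, hdec⟩ | hnew)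
        · exact ⟨haz, Or.inl hdec⟩
        · simp only [List.mem_map, List.mem_filter, Bool.and_eq_true] at hnew
          obtain ⟨c', ⟨hc'az, hcl, hcr⟩, heq⟩ := hnew
          have h1 : ch = m := congrArg Prod.fst heq
          have h2 : c' = c := congrArg Prod.snd heq
          subst h1
          subst h2
          refine ⟨hc'az, Or.inr ⟨rfl, ?_, ?_⟩⟩
          · exact (hL c').mp ((PySem.Set.contains_iff _ _).mp hcl)
          · exact ((hR2 c').2).mp hcr
      · rintro ⟨haz, hold | ⟨rfl, hcpre, hcrest⟩⟩
        · exact Or.inl ⟨haz, hold⟩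
        · right
          simp only [List.mem_map, List.mem_filter, Bool.and_eq_true]
          exact ⟨c, ⟨haz, (PySem.Set.contains_iff _ _).mpr ((hL c).mpr hcpre),
            ((hR2 c).2).mpr hcrest⟩, rfl⟩
    have hmain := ih (pre ++ [ch])
      (PySem.Set.update res
        ((pvAz.filter (fun c => PySem.Set.contains left c &&
          (if (right.insert ch (right.getD ch 0 - 1)).getD ch 0 = 0
           then (right.insert ch (right.getD ch 0 - 1)).erase ch
           else right.insert ch (right.getD ch 0 - 1)).contains c)).map (fun c => (ch, c))))
      (PySem.Set.add left ch)
      (if (right.insert ch (right.getD ch 0 - 1)).getD ch 0 = 0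
       then (right.insert ch (right.getD ch 0 - 1)).erase ch
       else right.insert ch (right.getD ch 0 - 1))
      (PySem.Set.nodup_update _ _ hnd) hL2 hR2 hres2
    rw [List.foldl_cons, hstep, show pre ++ ch :: rest = (pre ++ [ch]) ++ rest by simp]
    exact hmain

-- characterisation of A
lemma pvA_char (cs : List Char) :
    (cs.foldl pvA_step (PySem.Set.empty, PySem.Set.empty,
        cs.foldl (fun d ch => d.insert ch (1 + d.getD ch 0)) PySem.Dict.empty)).1.Nodup ∧
    (∀ m c, (m, c) ∈ (cs.foldl pvA_step (PySem.Set.empty, PySem.Set.empty,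
        cs.foldl (fun d ch => d.insert ch (1 + d.getD ch 0)) PySem.Dict.empty)).1 ↔
      c ∈ pvAz ∧ pvQ cs c m) := by
  have h := pvA_loop cs [] PySem.Set.empty PySem.Set.empty
    (cs.foldl (fun d ch => d.insert ch (1 + d.getD ch 0)) PySem.Dict.empty)
    List.nodup_nil
    (by intro c; simp [PySem.Set.empty])
    (pvRinv_init cs)
    (by
      intro m c
      simp only [PySem.Set.empty, List.not_mem_nil, false_iff]
      rintro ⟨-, p1, p2, heq, -, -⟩
      have hlen := congrArg List.length heq
      simp only [List.length_nil, List.length_append, List.length_cons] at hlen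
      omega)
  simpa using h

-- ---- B side ----

lemma pv_singleton_prefix_drop (cs : List Char) (c : Char) (n : Nat) :
    [c] <+: cs.drop n ↔ cs[n]? = some c := by
  rw [← List.head?_drop]
  constructor
  · rintro ⟨u, hu⟩
    rw [← hu]
    rfl
  · intro h
    cases hd : cs.drop n with
    | nil => rw [hd] at h; simp at h
    | cons x t =>
      rw [hd] at h
      simp only [List.head?_cons, Option.some.injEq] at h
      subst h
      exact ⟨t, rfl⟩

lemma pv_rfind_go_zero (cs sub : List Char) :
    PySem.Chars.rfind.go cs sub 0 = if sub.isPrefixOf cs then (0 : Int) else -1 := rfl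

lemma pv_rfind_go_succ (cs sub : List Char) (j : Nat) :
    PySem.Chars.rfind.go cs sub (j + 1) =
      if sub.isPrefixOf (List.drop (j + 1) cs) then ((j + 1 : Nat) : Int)
      else PySem.Chars.rfind.go cs sub j := rfl

-- rfind.go finds the greatest hit position ≤ fuel
lemma pv_rfind_go_spec (cs : List Char) (c : Char) (j : Nat) :
    (PySem.Chars.rfind.go cs [c] j = -1 ∧ ∀ i ≤ j, cs[i]? ≠ some c) ∨
    (∃ k : Nat, PySem.Chars.rfind.go cs [c] j = (k : Int) ∧ k ≤ j ∧ cs[k]? = some c ∧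
      ∀ i, k < i → i ≤ j → cs[i]? ≠ some c) := by
  induction j with
  | zero =>
    by_cases h : cs[0]? = some c
    · right
      refine ⟨0, ?_, le_refl _, h, fun i h1 h2 => by omega⟩
      rw [pv_rfind_go_zero, if_pos (List.isPrefixOf_iff_prefix.mpr
        (by simpa using (pv_singleton_prefix_drop cs c 0).mpr h))]
      simp
    · left
      refine ⟨?_, fun i hi => by rwa [Nat.le_zero.mp hi]⟩
      rw [pv_rfind_go_zero, if_neg]
      intro hpre
      exact h (by simpa using (pv_singleton_prefix_drop cs c 0).mp (List.isPrefixOf_iff_prefix.mp hpre))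
  | succ j ih =>
    by_cases h : cs[j+1]? = some c
    · right
      refine ⟨j + 1, ?_, le_refl _, h, fun i h1 h2 => by omega⟩
      rw [pv_rfind_go_succ, if_pos
        (List.isPrefixOf_iff_prefix.mpr ((pv_singleton_prefix_drop cs c (j+1)).mpr h))]
    · rw [pv_rfind_go_succ, if_neg (fun hpre =>
        h ((pv_singleton_prefix_drop cs c (j+1)).mp (List.isPrefixOf_iff_prefix.mp hpre)))]
      rcases ih with ⟨heq, hall⟩ | ⟨k, heq, hk, hkc, hmax⟩
      · left
        refine ⟨heq, fun i hi => ?_⟩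
        rcases Nat.lt_or_ge i (j + 1) with hlt | hge
        · exact hall i (by omega)
        · rwa [show i = j + 1 by omega]
      · right
        refine ⟨k, heq, by omega, hkc, fun i h1 h2 => ?_⟩
        rcases Nat.lt_or_ge i (j + 1) with hlt | hge
        · exact hmax i h1 (by omega)
        · rwa [show i = j + 1 by omega]

lemma pv_len_ofList (L : List Char) :
    PySem.Set.len (PySem.Set.ofList L) = (L.toFinset.card : Int) := by
  have h1 : (PySem.Set.ofList L).toFinset = L.toFinset := by
    ext x
    simp [List.mem_toFinset, PySem.Set.mem_ofList]
  have h2 : (PySem.Set.ofList L).toFinset.card = (PySem.Set.ofList L).length :=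
    List.toFinset_card_of_nodup (PySem.Set.nodup_ofList L)
  simp only [PySem.Set.len]
  rw [← h2, h1]

-- per-letter value of B equals the number of distinct middles
lemma pvB_letter (cs : List Char) (c : Char) :
    (if PySem.Chars.find cs [c] ≠ -1 ∧ PySem.Chars.rfind cs [c] > PySem.Chars.find cs [c] then
       PySem.Set.len (PySem.Set.ofList
         (PySem.List.slice cs (some (PySem.Chars.find cs [c] + 1)) (some (PySem.Chars.rfind cs [c]))))
     else 0)
    = ((cs.toFinset.filter (fun m => pvQb cs c m = true)).card : Int) := by
  by_cases hcond : PySem.Chars.find cs [c] ≠ -1 ∧ PySem.Chars.rfind cs [c] > PySem.Chars.find cs [c]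
  · rw [if_pos hcond]
    obtain ⟨hne, hgt⟩ := hcond
    have hlo0 : 0 ≤ PySem.Chars.find cs [c] := by
      have := PySem.Chars.neg_one_le_find cs [c]
      omega
    have hfind : PySem.Chars.find cs [c] = ((PySem.Chars.find cs [c]).toNat : Int) := by omega
    set a : Nat := (PySem.Chars.find cs [c]).toNat with ha
    have hspec := PySem.Chars.find_spec (s := cs) (sub := [c]) hlo0
    have hac : cs[a]? = some c := (pv_singleton_prefix_drop cs c a).mp hspec.1
    have hamin : ∀ i, i < a → cs[i]? ≠ some c := fun i hi hic =>
      hspec.2 i hi ((pv_singleton_prefix_drop cs c i).mpr hic)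
    rcases pv_rfind_go_spec cs c cs.length with ⟨heq, -⟩ | ⟨b, heq, hble, hbc, hbmax⟩
    · exfalso
      rw [PySem.Chars.rfind, heq] at hgt
      omega
    · have hrfind : PySem.Chars.rfind cs [c] = (b : Int) := by
        rw [PySem.Chars.rfind, heq]
      have hab : a < b := by
        rw [hrfind, hfind] at hgt
        exact_mod_cast hgt
      rw [hfind, hrfind, show ((a : Int) + 1) = ((a + 1 : Nat) : Int) by push_cast; ring,
        PySem.List.slice_natCast, pv_len_ofList]
      congr 1
      congr 1
      ext m
      simp only [List.mem_toFinset, Finset.mem_filter, List.mem_toFinset]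
      rw [pv_mem_take_drop_iff]
      constructor
      · rintro ⟨j, h1, h2, hj⟩
        refine ⟨List.mem_iff_getElem?.mpr ⟨j, hj⟩, ?_⟩
        rw [pvQb_eq_true_iff]
        exact ⟨a, j, b, h1, h2, hac, hj, hbc⟩
      · rintro ⟨-, hq⟩
        rw [pvQb_eq_true_iff] at hq
        obtain ⟨i, j, k, hij, hjk, hi, hj, hk⟩ := hq
        have hai : a ≤ i := by
          by_contra hlt
          exact hamin i (by omega) hi
        have hkb : k ≤ b := by
          by_contra hlt
          exact hbmax k (by omega) (by
            have := pv_getElem?_lt hk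
            omega) hk
        exact ⟨j, by omega, by omega, hj⟩
  · rw [if_neg hcond]
    have hempty : cs.toFinset.filter (fun m => pvQb cs c m = true) = ∅ := by
      rw [Finset.filter_eq_empty_iff]
      intro m _ hq
      rw [pvQb_eq_true_iff] at hq
      obtain ⟨i, j, k, hij, hjk, hi, hj, hk⟩ := hq
      have hne : PySem.Chars.find cs [c] ≠ -1 := by
        rw [PySem.Chars.find_ne_neg_one_iff]
        exact List.infix_iff_prefix_suffix.mpr
          ⟨cs.drop i, (pv_singleton_prefix_drop cs c i).mpr hi, List.drop_suffix i cs⟩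
      have hlo0 : 0 ≤ PySem.Chars.find cs [c] := by
        have := PySem.Chars.neg_one_le_find cs [c]
        omega
      have hspec := PySem.Chars.find_spec (s := cs) (sub := [c]) hlo0
      have hamin : ∀ i', i' < (PySem.Chars.find cs [c]).toNat → cs[i']? ≠ some c := fun i' hi' hic =>
        hspec.2 i' hi' ((pv_singleton_prefix_drop cs c i').mpr hic)
      have hai : (PySem.Chars.find cs [c]).toNat ≤ i := by
        by_contra hlt
        exact hamin i (by omega) hi
      rcases pv_rfind_go_spec cs c cs.length with ⟨-, hall⟩ | ⟨b, heq, hble, hbc, hbmax⟩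
      · exact hall k (by have := pv_getElem?_lt hk; omega) hk
      · have hrfind : PySem.Chars.rfind cs [c] = (b : Int) := by
          rw [PySem.Chars.rfind, heq]
        have hkb : k ≤ b := by
          by_contra hlt
          exact hbmax k (by omega) (by have := pv_getElem?_lt hk; omega) hk
        exact hcond ⟨hne, by rw [hrfind]; omega⟩
    rw [hempty]
    simp

-- counting: a nodup pair set whose members are exactly the (middle, letter) pairs
lemma pv_count (cs : List Char) (r : List (Char × Char)) (hnd : r.Nodup)
    (hmem : ∀ m c, (m, c) ∈ r ↔ c ∈ pvAz ∧ pvQb cs c m = true) :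
    (r.length : Int) =
      (pvAz.map (fun c => ((cs.toFinset.filter (fun m => pvQb cs c m = true)).card : Int))).sum := by
  have hAznd : pvAz.Nodup := by decide
  have h1 : r.length = r.toFinset.card := (List.toFinset_card_of_nodup hnd).symm
  have hmap : ∀ p ∈ r.toFinset, Prod.snd p ∈ pvAz.toFinset := by
    intro p hp
    rw [List.mem_toFinset] at hp ⊢
    exact ((hmem p.1 p.2).mp hp).1
  have h2 := Finset.card_eq_sum_card_fiberwise hmap
  have h3 : ∀ b ∈ pvAz.toFinset,
      (r.toFinset.filter (fun p => p.2 = b)).card =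
        (cs.toFinset.filter (fun m => pvQb cs b m = true)).card := by
    intro b hb
    rw [List.mem_toFinset] at hb
    have himg : r.toFinset.filter (fun p => p.2 = b) =
        (cs.toFinset.filter (fun m => pvQb cs b m = true)).image (fun m => (m, b)) := by
      ext p
      simp only [Finset.mem_filter, List.mem_toFinset, Finset.mem_image]
      constructor
      · rintro ⟨hp, hpb⟩
        obtain ⟨m, c⟩ := p
        simp only at hpb
        subst hpb
        have hh := (hmem m (m, c).2).mp hp
        exact ⟨m, ⟨pvQb_mem cs (m, c).2 m hh.2, hh.2⟩, rfl⟩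
      · rintro ⟨m, ⟨hmcs, hq⟩, rfl⟩
        exact ⟨(hmem m b).mpr ⟨hb, hq⟩, rfl⟩
    rw [himg, Finset.card_image_of_injective _ (fun x y hxy => congrArg Prod.fst hxy)]
  rw [h1, h2, Finset.sum_congr rfl h3, ← List.sum_toFinset _ hAznd]
  push_cast
  rfl

-- ===== VERDICT (by name: the statement is the Claim_ definition above) =====
theorem unique_length_three_palindromic_subseq_spec : Claim_equal_unique_length_three_palindromic_subseq := by
  intro s _
  unfold Spec_unique_length_three_palindromic_subseq
  unfold unique_length_three_palindromic_subseq unique_length_three_palindromic_subseq_alt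
  set cs := s.toList with hcs
  -- A side
  obtain ⟨hnd, hmemQ⟩ := pvA_char cs
  have hmem : ∀ m c, (m, c) ∈ (cs.foldl pvA_step (PySem.Set.empty, PySem.Set.empty,
      cs.foldl (fun d ch => d.insert ch (1 + d.getD ch 0)) PySem.Dict.empty)).1 ↔
      c ∈ pvAz ∧ pvQb cs c m = true := by
    intro m c
    rw [hmemQ m c, pvQ_iff_Qb]
  have hA : PySem.Set.len (cs.foldl pvA_step (PySem.Set.empty, PySem.Set.empty,
      cs.foldl (fun d ch => d.insert ch (1 + d.getD ch 0)) PySem.Dict.empty)).1 =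
      (pvAz.map (fun c => ((cs.toFinset.filter (fun m => pvQb cs c m = true)).card : Int))).sum := by
    rw [PySem.Set.len]
    exact pv_count cs _ hnd hmem
  rw [hA]
  -- B side
  have h26 : (26 : Int) = ((26 : Nat) : Int) := by norm_num
  rw [h26, PySem.List.pyRange_zero_natCast, List.foldl_map]
  have hc : ∀ (k : Nat), ((97 : Int) + (k : Int)).toNat = 97 + k := fun k => by omega
  simp only [hc]
  have hbody : (fun (total : Int) (k : Nat) =>
      if PySem.Chars.find cs [Char.ofNat (97 + k)] ≠ -1 ∧
          PySem.Chars.rfind cs [Char.ofNat (97 + k)] > PySem.Chars.find cs [Char.ofNat (97 + k)] then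
        total + PySem.Set.len (PySem.Set.ofList
          (PySem.List.slice cs (some (PySem.Chars.find cs [Char.ofNat (97 + k)] + 1))
            (some (PySem.Chars.rfind cs [Char.ofNat (97 + k)]))))
      else total) =
      (fun (total : Int) (k : Nat) => total +
        ((cs.toFinset.filter (fun m => pvQb cs (Char.ofNat (97 + k)) m = true)).card : Int)) := by
    funext total k
    rw [← pvB_letter cs (Char.ofNat (97 + k))]
    split <;> simp
  rw [hbody, PySem.List.foldl_add,
    show pvAz = (List.range 26).map (fun k => Char.ofNat (97 + k)) from rfl, List.map_map]
  simp [Function.comp_def]
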